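-- pv_equiv track=rewrite | github.com/santiagonars/Algorithms-DataStructures | Leetcode/medium/expressive_words.py | isStretchy
-- ===== SOURCE A (Python) =====
-- def isStretchy(s, word):
--     n = len(s) # "heeellooo"
--     m = len(word) # ["hello", "hi", "helo"]
--
--     j = 0
--     for i in range(n):
--         if j < m and s[i] == word[j]:
--             j += 1
--         elif i > 1 and s[i] == s[i - 1] == s[i - 2]:
--             continue
--         elif 0 < i < n - 1 and s[i - 1] == s[i] == s[i + 1]:
--             continue
--         else:
--             return False
--
--     return j == m
-- ===== SOURCE B (Python) =====
-- def _groups(t):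
--     # run-length encoding: maximal runs as (char, count), peeled from the front
--     if not t:
--         return []
--     c = t[0]
--     k = 1
--     while k < len(t) and t[k] == c:
--         k += 1
--     return [(c, k)] + _groups(t[k:])
--
-- def _check(gs, gw):
--     while gs and gw:
--         (cs, ns), (cw, nw) = gs[0], gw[0]
--         if cs != cw:
--             return False
--         if ns != nw and not (ns >= 3 and ns >= nw):
--             return False
--         gs, gw = gs[1:], gw[1:]
--     return not gs and not gw
--
-- def isStretchy(s, word):
--     return _check(_groups(s), _groups(word))
-- ===== Notes on version B (the rewrite author's own statement) =====
-- stated objective: alternative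
-- what changed: Replaces A's fused two-pointer scan with index lookback/lookahead by a two-phase structure: run-length encode both strings into (char,count) groups, then compare groups pairwise with the stretch rule count_s == count_w or (count_s >= 3 and count_s >= count_w).
import Mathlib
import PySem

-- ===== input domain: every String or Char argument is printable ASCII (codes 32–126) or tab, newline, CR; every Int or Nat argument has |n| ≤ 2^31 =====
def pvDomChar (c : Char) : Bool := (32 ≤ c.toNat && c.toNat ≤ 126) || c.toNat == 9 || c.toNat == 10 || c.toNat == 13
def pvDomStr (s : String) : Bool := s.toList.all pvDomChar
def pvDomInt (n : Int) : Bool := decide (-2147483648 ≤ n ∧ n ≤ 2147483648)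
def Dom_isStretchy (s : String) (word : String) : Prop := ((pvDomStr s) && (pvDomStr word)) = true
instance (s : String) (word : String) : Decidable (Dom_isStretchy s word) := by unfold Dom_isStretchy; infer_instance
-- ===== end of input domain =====

-- B replaces A's fused two-pointer scan by run-length encoding both strings and comparing
-- the groups pairwise (alternative structure, same cost; return value only, no mutation).


-- ===== PORT A =====
-- A's for-loop over range(n) with early returns, as recursion on i; s[i] etc. are
-- always in range under the guards, so getD is exact.
def aLoop (sl wl : List Char) (i j : Nat) : Bool :=
  if i < sl.length then
    if j < wl.length ∧ sl.getD i 'a' = wl.getD j 'a' then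
      aLoop sl wl (i+1) (j+1)
    else if 1 < i ∧ sl.getD i 'a' = sl.getD (i-1) 'a' ∧ sl.getD (i-1) 'a' = sl.getD (i-2) 'a' then
      aLoop sl wl (i+1) j
    else if 0 < i ∧ i < sl.length - 1 ∧ sl.getD (i-1) 'a' = sl.getD i 'a' ∧ sl.getD i 'a' = sl.getD (i+1) 'a' then
      aLoop sl wl (i+1) j
    else false
  else decide (j = wl.length)
termination_by sl.length - i

def isStretchy (s : String) (word : String) : Bool :=
  aLoop s.toList word.toList 0 0

-- ===== PORT B =====
-- _groups: peel the maximal leading run, recurse on the rest.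
def pvGroups : List Char → List (Char × Nat)
  | [] => []
  | c :: rest =>
    (c, (rest.takeWhile (fun x => x = c)).length + 1) ::
      pvGroups (rest.dropWhile (fun x => x = c))
termination_by l => l.length
decreasing_by
  exact Nat.lt_succ_of_le (List.length_dropWhile_le _ _)

-- _check: walk both group lists in lockstep.
def pvCheck : List (Char × Nat) → List (Char × Nat) → Bool
  | (cs, ns) :: gs, (cw, nw) :: gw =>
    if cs ≠ cw then false
    else if ns ≠ nw ∧ ¬(3 ≤ ns ∧ nw ≤ ns) then false
    else pvCheck gs gw
  | [], [] => true
  | _, _ => false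

def isStretchy_alt (s : String) (word : String) : Bool :=
  pvCheck (pvGroups s.toList) (pvGroups word.toList)

-- ===== PRECONDITION & SPEC =====
def Spec_isStretchy (s : String) (word : String) (out : Bool) : Prop := out = isStretchy_alt s word
instance (s : String) (word : String) (out : Bool) : Decidable (Spec_isStretchy s word out) := by unfold Spec_isStretchy; infer_instance

-- ===== CLAIM (what is proved, stated in full; the proofs are below) =====
def Claim_equal_isStretchy : Prop := ∀ (s : String) (word : String), Dom_isStretchy s word → Spec_isStretchy s word (isStretchy s word)

-- ===== LEMMAS AND PROOFS =====

-- indexing into (replicate k c ++ tl)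
lemma getD_rep_lt (k : Nat) (c d : Char) (tl : List Char) {p : Nat} (h : p < k) :
    (List.replicate k c ++ tl).getD p d = c := by
  rw [List.getD_append _ _ _ _ (by simpa using h)]
  simp [List.getD, h]

lemma getD_rep_ge (k : Nat) (c d : Char) (tl : List Char) {p : Nat} (h : k ≤ p) :
    (List.replicate k c ++ tl).getD p d = tl.getD (p - k) d := by
  rw [List.getD_append_right _ _ _ _ (by simpa using h)]
  simp

lemma getD_drop (wl : List Char) (j0 j : Nat) (d : Char) :
    (wl.drop j0).getD j d = wl.getD (j0 + j) d := by
  simp [List.getD, List.getElem?_drop]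

lemma getD_app_r (u v : List Char) (i : Nat) (d : Char) :
    (u ++ v).getD (u.length + i) d = v.getD i d := by
  simp [List.getD, List.getElem?_append_right (Nat.le_add_right u.length i)]

lemma getD_app_l (u v : List Char) (p : Nat) (d : Char) (h : p < u.length) :
    (u ++ v).getD p d = u.getD p d := by
  simp [List.getD, List.getElem?_append_left h]

lemma getD_last (u : List Char) (h : u ≠ []) (d : Char) :
    u.getD (u.length - 1) d = u.getLast h := by
  rw [List.getLast_eq_getElem]
  simp [List.getD, List.getElem?_eq_getElem
    (by simp [Nat.sub_lt (List.length_pos_of_ne_nil h)] : u.length - 1 < u.length)]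

lemma getD_head (v : List Char) (h : v ≠ []) (d : Char) :
    v.getD 0 d = v.head h := by
  cases v with
  | nil => simp at h
  | cons a t => simp [List.getD]

lemma hb_ne (u v : List Char) (hb : ∀ x ∈ u.getLast?, ∀ y ∈ v.head?, x ≠ y)
    (hu : u ≠ []) (hv : v ≠ []) : u.getLast hu ≠ v.head hv :=
  hb _ (by simp [List.getLast?_eq_some_getLast hu]) _ (by simp [List.head?_eq_some_head hv])

-- at a run boundary the two adjacent characters differ
lemma bound_ne (u v : List Char) (hb : ∀ x ∈ u.getLast?, ∀ y ∈ v.head?, x ≠ y)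
    (hu : u ≠ []) (hv : v ≠ []) :
    (u ++ v).getD (u.length - 1) 'a' ≠ (u ++ v).getD u.length 'a' := by
  rw [getD_app_l u v _ _ (Nat.sub_lt (List.length_pos_of_ne_nil hu) one_pos),
      getD_last u hu, show u.length = u.length + 0 from rfl, getD_app_r, getD_head v hv]
  exact hb_ne u v hb hu hv

-- one-step unfoldings of aLoop
lemma aLoop_end {sl wl : List Char} {i j : Nat} (h : ¬ i < sl.length) :
    aLoop sl wl i j = decide (j = wl.length) := by
  rw [aLoop]; simp [h]

lemma aLoop_step_match {sl wl : List Char} {i j : Nat} (h1 : i < sl.length)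
    (h2 : j < wl.length) (h3 : sl.getD i 'a' = wl.getD j 'a') :
    aLoop sl wl i j = aLoop sl wl (i+1) (j+1) := by
  rw [aLoop, if_pos h1, if_pos ⟨h2, h3⟩]

lemma aLoop_step_skip2 {sl wl : List Char} {i j : Nat} (h1 : i < sl.length)
    (hc1 : ¬ (j < wl.length ∧ sl.getD i 'a' = wl.getD j 'a'))
    (h2 : 1 < i) (h3 : sl.getD i 'a' = sl.getD (i-1) 'a')
    (h4 : sl.getD (i-1) 'a' = sl.getD (i-2) 'a') :
    aLoop sl wl i j = aLoop sl wl (i+1) j := by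
  rw [aLoop, if_pos h1, if_neg hc1, if_pos ⟨h2, h3, h4⟩]

lemma aLoop_step_skip3 {sl wl : List Char} {i j : Nat} (h1 : i < sl.length)
    (hc1 : ¬ (j < wl.length ∧ sl.getD i 'a' = wl.getD j 'a'))
    (hc2 : ¬ (1 < i ∧ sl.getD i 'a' = sl.getD (i-1) 'a' ∧ sl.getD (i-1) 'a' = sl.getD (i-2) 'a'))
    (h2 : 0 < i) (h3 : i < sl.length - 1) (h4 : sl.getD (i-1) 'a' = sl.getD i 'a')
    (h5 : sl.getD i 'a' = sl.getD (i+1) 'a') :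
    aLoop sl wl i j = aLoop sl wl (i+1) j := by
  rw [aLoop, if_pos h1, if_neg hc1, if_neg hc2, if_pos ⟨h2, h3, h4, h5⟩]

lemma aLoop_false {sl wl : List Char} {i j : Nat} (h1 : i < sl.length)
    (hc1 : ¬ (j < wl.length ∧ sl.getD i 'a' = wl.getD j 'a'))
    (hc2 : ¬ (1 < i ∧ sl.getD i 'a' = sl.getD (i-1) 'a' ∧ sl.getD (i-1) 'a' = sl.getD (i-2) 'a'))
    (hc3 : ¬ (0 < i ∧ i < sl.length - 1 ∧ sl.getD (i-1) 'a' = sl.getD i 'a' ∧ sl.getD i 'a' = sl.getD (i+1) 'a')) :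
    aLoop sl wl i j = false := by
  rw [aLoop, if_pos h1, if_neg hc1, if_neg hc2, if_neg hc3]

-- decomposition of a nonempty list into its leading run
lemma takeWhile_eq_replicate (c : Char) (l : List Char) :
    l.takeWhile (fun x => x = c) = List.replicate (l.takeWhile (fun x => x = c)).length c := by
  rw [List.eq_replicate_iff]
  exact ⟨rfl, fun b hb => by simpa using List.mem_takeWhile_imp hb⟩

lemma head?_dropWhile_ne (c : Char) (l : List Char) :
    (l.dropWhile (fun x => x = c)).head? ≠ some c := by
  intro h
  have := List.head?_dropWhile_not (fun x => decide (x = c)) l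
  rw [h] at this
  simp at this


-- translation of A's three loop conditions across a group boundary
lemma C2iff (u v : List Char) (hb : ∀ x ∈ u.getLast?, ∀ y ∈ v.head?, x ≠ y)
    (i : Nat) (hi : i < v.length) :
    (1 < u.length + i ∧ (u++v).getD (u.length+i) 'a' = (u++v).getD (u.length+i-1) 'a'
      ∧ (u++v).getD (u.length+i-1) 'a' = (u++v).getD (u.length+i-2) 'a')
    ↔ (1 < i ∧ v.getD i 'a' = v.getD (i-1) 'a' ∧ v.getD (i-1) 'a' = v.getD (i-2) 'a') := by
  have hv : v ≠ [] := List.ne_nil_of_length_pos (by omega)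
  match i with
  | 0 =>
    refine iff_of_false ?_ (by omega)
    rintro ⟨h1, h2, h3⟩
    have hu : u ≠ [] := List.ne_nil_of_length_pos (by omega)
    exact bound_ne u v hb hu hv (by simpa using h2.symm)
  | 1 =>
    refine iff_of_false ?_ (by omega)
    rintro ⟨h1, h2, h3⟩
    have hu : u ≠ [] := List.ne_nil_of_length_pos (by omega)
    have e1 : u.length + 1 - 2 = u.length - 1 := by omega
    rw [show u.length + 1 - 1 = u.length from by omega, e1] at h3
    exact bound_ne u v hb hu hv h3.symm
  | (i+2) =>
    rw [show u.length + (i+2) - 1 = u.length + (i+1) from by omega,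
        show u.length + (i+2) - 2 = u.length + i from by omega,
        getD_app_r, getD_app_r, getD_app_r]
    constructor
    · rintro ⟨_, h2, h3⟩; exact ⟨by omega, h2, h3⟩
    · rintro ⟨_, h2, h3⟩; exact ⟨by omega, h2, h3⟩

lemma C3iff (u v : List Char) (hb : ∀ x ∈ u.getLast?, ∀ y ∈ v.head?, x ≠ y)
    (i : Nat) (hi : i < v.length) :
    (0 < u.length + i ∧ u.length + i < (u++v).length - 1
      ∧ (u++v).getD (u.length+i-1) 'a' = (u++v).getD (u.length+i) 'a'
      ∧ (u++v).getD (u.length+i) 'a' = (u++v).getD (u.length+i+1) 'a')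
    ↔ (0 < i ∧ i < v.length - 1 ∧ v.getD (i-1) 'a' = v.getD i 'a' ∧ v.getD i 'a' = v.getD (i+1) 'a') := by
  have hv : v ≠ [] := List.ne_nil_of_length_pos (by omega)
  match i with
  | 0 =>
    refine iff_of_false ?_ (by omega)
    rintro ⟨h1, h2, h3, h4⟩
    have hu : u ≠ [] := List.ne_nil_of_length_pos (by omega)
    exact bound_ne u v hb hu hv (by simpa using h3)
  | (i+1) =>
    rw [show u.length + (i+1) - 1 = u.length + i from by omega,
        show u.length + (i+1) + 1 = u.length + (i+2) from rfl,
        getD_app_r, getD_app_r, getD_app_r, List.length_append]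
    constructor
    · rintro ⟨_, h2, h3, h4⟩; exact ⟨by omega, by omega, h3, h4⟩
    · rintro ⟨_, h2, h3, h4⟩; exact ⟨by omega, by omega, h3, h4⟩

-- the shift lemma: at a group boundary the loop state restarts
lemma aLoop_shift (u v wl : List Char) (j0 : Nat)
    (hb : ∀ x ∈ u.getLast?, ∀ y ∈ v.head?, x ≠ y) (hj0 : j0 ≤ wl.length)
    (i j : Nat) : aLoop (u ++ v) wl (u.length + i) (j0 + j) = aLoop v (wl.drop j0) i j := by
  by_cases hi : i < v.length
  · have hiL : u.length + i < (u ++ v).length := by rw [List.length_append]; omega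
    have hC1 : (j0 + j < wl.length ∧ (u++v).getD (u.length+i) 'a' = wl.getD (j0+j) 'a')
        ↔ (j < (wl.drop j0).length ∧ v.getD i 'a' = (wl.drop j0).getD j 'a') := by
      rw [getD_app_r, getD_drop, List.length_drop]
      constructor <;> rintro ⟨h, h2⟩ <;> exact ⟨by omega, h2⟩
    by_cases c1 : j < (wl.drop j0).length ∧ v.getD i 'a' = (wl.drop j0).getD j 'a'
    · rw [aLoop_step_match hiL (hC1.mpr c1).1 (hC1.mpr c1).2, aLoop_step_match hi c1.1 c1.2]
      exact aLoop_shift u v wl j0 hb hj0 (i+1) (j+1)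
    · have hc1L : ¬ (j0 + j < wl.length ∧ (u++v).getD (u.length+i) 'a' = wl.getD (j0+j) 'a') :=
        fun h => c1 (hC1.mp h)
      by_cases c2 : 1 < i ∧ v.getD i 'a' = v.getD (i-1) 'a' ∧ v.getD (i-1) 'a' = v.getD (i-2) 'a'
      · obtain ⟨g1, g2, g3⟩ := (C2iff u v hb i hi).mpr c2
        rw [aLoop_step_skip2 hiL hc1L g1 g2 g3, aLoop_step_skip2 hi c1 c2.1 c2.2.1 c2.2.2]
        exact aLoop_shift u v wl j0 hb hj0 (i+1) j
      · have hc2L := fun h => c2 ((C2iff u v hb i hi).mp h)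
        by_cases c3 : 0 < i ∧ i < v.length - 1 ∧ v.getD (i-1) 'a' = v.getD i 'a'
            ∧ v.getD i 'a' = v.getD (i+1) 'a'
        · obtain ⟨g1, g2, g3, g4⟩ := (C3iff u v hb i hi).mpr c3
          rw [aLoop_step_skip3 hiL hc1L hc2L g1 g2 g3 g4,
              aLoop_step_skip3 hi c1 c2 c3.1 c3.2.1 c3.2.2.1 c3.2.2.2]
          exact aLoop_shift u v wl j0 hb hj0 (i+1) j
        · have hc3L := fun h => c3 ((C3iff u v hb i hi).mp h)
          rw [aLoop_false hiL hc1L hc2L hc3L, aLoop_false hi c1 c2 c3]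
  · rw [aLoop_end (by rw [List.length_append]; omega), aLoop_end hi]
    simp only [List.length_drop, decide_eq_decide]
    omega
termination_by v.length - i

-- phase 1: matching advance through the common prefix of the two leading runs
lemma aLoop_phase1 (k l : Nat) (c : Char) (tl tw sl wl : List Char)
    (hsl : sl = List.replicate k c ++ tl) (hwl : wl = List.replicate l c ++ tw) :
    ∀ d t, t + d ≤ min k l → aLoop sl wl t t = aLoop sl wl (t+d) (t+d) := by
  intro d
  induction d with
  | zero => intro t _; rfl
  | succ d ih =>
    intro t h
    have e1 : sl.getD t 'a' = c := by rw [hsl]; exact getD_rep_lt k c 'a' tl (by omega)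
    have e2 : wl.getD t 'a' = c := by rw [hwl]; exact getD_rep_lt l c 'a' tw (by omega)
    rw [aLoop_step_match (by rw [hsl]; simp; omega) (by rw [hwl]; simp; omega) (by rw [e1, e2]),
        show t + (d+1) = (t+1) + d from by omega]
    exact ih (t+1) (by omega)

-- in phase 2 the first loop condition always fails: word is past its leading run
lemma phase2_c1 (l : Nat) (c : Char) (tw sl wl : List Char) {p : Nat}
    (hwl : wl = List.replicate l c ++ tw) (htw : tw.head? ≠ some c)
    (hp : sl.getD p 'a' = c) :
    ¬ (l < wl.length ∧ sl.getD p 'a' = wl.getD l 'a') := by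
  rintro ⟨hlen, heq⟩
  have hlw : wl.length = l + tw.length := by simp [hwl]
  have htw' : tw ≠ [] := by
    intro h; rw [h] at hlw; simp at hlw; omega
  have : wl.getD l 'a' = tw.head htw' := by
    rw [hwl, getD_rep_ge l c 'a' tw (le_refl l)]
    simpa using getD_head tw htw' 'a'
  rw [hp, this] at heq
  exact htw (heq ▸ List.head?_eq_some_head htw')

-- phase 2: stretch-skip across the rest of the run (k ≥ 3)
lemma aLoop_phase2 (k l : Nat) (c : Char) (tl tw sl wl : List Char)
    (hsl : sl = List.replicate k c ++ tl) (hwl : wl = List.replicate l c ++ tw)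
    (htw : tw.head? ≠ some c) (hk3 : 3 ≤ k) :
    ∀ d p, 1 ≤ p → p + d = k → aLoop sl wl p l = aLoop sl wl k l := by
  intro d
  induction d with
  | zero => intro p _ h; rw [show p = k from by omega]
  | succ d ih =>
    intro p hp1 h
    have hpk : p < k := by omega
    have hlen : k ≤ sl.length := by simp [hsl]
    have ep : sl.getD p 'a' = c := by rw [hsl]; exact getD_rep_lt k c 'a' tl hpk
    have hc1 := phase2_c1 l c tw sl wl hwl htw ep
    have h1 : p < sl.length := by omega
    rcases Nat.lt_or_ge p 2 with hp2 | hp2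
    · -- p = 1: use the forward-looking condition (k ≥ 3 so s[2] is still in the run)
      have hp1' : p = 1 := by omega
      subst hp1'
      have e0 : sl.getD 0 'a' = c := by rw [hsl]; exact getD_rep_lt k c 'a' tl (by omega)
      have e2 : sl.getD 2 'a' = c := by rw [hsl]; exact getD_rep_lt k c 'a' tl (by omega)
      rw [aLoop_step_skip3 h1 hc1 (fun h => absurd h.1 (by omega)) (by omega) (by omega) (by rw [e0, ep]) (by rw [ep, e2])]
      exact ih 2 (by omega) (by omega)
    · -- p ≥ 2: use the backward-looking condition
      have em1 : sl.getD (p-1) 'a' = c := by rw [hsl]; exact getD_rep_lt k c 'a' tl (by omega)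
      have em2 : sl.getD (p-2) 'a' = c := by rw [hsl]; exact getD_rep_lt k c 'a' tl (by omega)
      rw [aLoop_step_skip2 h1 hc1 (by omega) (by rw [ep, em1]) (by rw [em1, em2])]
      exact ih (p+1) (by omega) (by omega)

-- pvCheck on mismatched shapes
lemma pvGroups_cons (c : Char) (rest : List Char) :
    pvGroups (c :: rest) = (c, (rest.takeWhile (fun x => x = c)).length + 1)
      :: pvGroups (rest.dropWhile (fun x => x = c)) := by
  rw [pvGroups]

lemma pvCheck_nil_cons (g : Char × Nat) (gs : List (Char × Nat)) : pvCheck [] (g :: gs) = false := rfl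

lemma pvCheck_cons_nil (g : Char × Nat) (gs : List (Char × Nat)) : pvCheck (g :: gs) [] = false := rfl

-- takeWhile/dropWhile through a leading run
lemma takeWhile_rep (m : Nat) (c : Char) (tw : List Char) (htw : tw.head? ≠ some c) :
    (List.replicate m c ++ tw).takeWhile (fun x => x = c) = List.replicate m c ∧
    (List.replicate m c ++ tw).dropWhile (fun x => x = c) = tw := by
  induction m with
  | zero =>
    simp only [List.replicate_zero, List.nil_append]
    cases tw with
    | nil => simp
    | cons a t =>
      have ha : a ≠ c := by simpa using htw
      simp [ha]
  | succ m ih =>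
    simp only [List.replicate_succ, List.cons_append, List.takeWhile_cons, List.dropWhile_cons]
    simp [ih]

lemma pvGroups_rep (m : Nat) (c : Char) (tw : List Char) (htw : tw.head? ≠ some c) :
    pvGroups (List.replicate (m+1) c ++ tw) = (c, m+1) :: pvGroups tw := by
  rw [List.replicate_succ, List.cons_append, pvGroups,
      (takeWhile_rep m c tw htw).1, (takeWhile_rep m c tw htw).2]
  simp

lemma hb_rep (k : Nat) (hk : 1 ≤ k) (c : Char) (tl : List Char) (htl : tl.head? ≠ some c) :
    ∀ x ∈ (List.replicate k c).getLast?, ∀ y ∈ tl.head?, x ≠ y := by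
  intro x hx y hy
  have hx' : c = x := by
    rcases Nat.exists_eq_add_of_le hk with ⟨m, hm⟩
    rw [hm, Nat.add_comm, List.replicate_succ', List.getLast?_concat] at hx
    simpa using hx
  have hy' : y ≠ c := by
    intro h; rw [h] at hy; rw [hy] at htl; simp at htl
  rw [← hx']; exact fun h => hy' h.symm

-- the main equivalence over lists
lemma aLoop_eq_check (sl wl : List Char) : aLoop sl wl 0 0 = pvCheck (pvGroups sl) (pvGroups wl) := by
  cases sl with
  | nil =>
    rw [aLoop_end (by simp)]
    cases wl with
    | nil => simp [pvGroups, pvCheck]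
    | cons w ws => rw [pvGroups_cons, show pvGroups ([] : List Char) = [] from by rw [pvGroups], pvCheck_nil_cons]; simp
  | cons c rest =>
    have ht := takeWhile_eq_replicate c rest
    have hsl : c :: rest = List.replicate ((rest.takeWhile (fun x => x = c)).length + 1) c
        ++ rest.dropWhile (fun x => x = c) := by
      rw [List.replicate_succ, List.cons_append, ← ht, List.takeWhile_append_dropWhile]
    generalize hk1 : (rest.takeWhile (fun x => x = c)).length + 1 = k at hsl
    generalize htl0 : rest.dropWhile (fun x => x = c) = tl at hsl
    have hk : 1 ≤ k := by omega
    have htl : tl.head? ≠ some c := htl0 ▸ head?_dropWhile_ne c rest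
    have hgs : pvGroups (c :: rest) = (c, k) :: pvGroups tl := by
      rw [pvGroups, htl0, hk1]
    have hslen : (c :: rest).length = k + tl.length := by rw [hsl]; simp
    have htlt : tl.length < (c :: rest).length := by omega
    have htw := takeWhile_eq_replicate c wl
    have hwl : wl = List.replicate (wl.takeWhile (fun x => x = c)).length c
        ++ wl.dropWhile (fun x => x = c) := by
      rw [← htw, List.takeWhile_append_dropWhile]
    generalize hl0 : (wl.takeWhile (fun x => x = c)).length = l at hwl
    generalize htw0 : wl.dropWhile (fun x => x = c) = tw at hwl
    have htwh : tw.head? ≠ some c := htw0 ▸ head?_dropWhile_ne c wl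
    have hwlen : wl.length = l + tw.length := by rw [hwl]; simp
    have hb := hb_rep k hk c tl htl
    rcases Nat.eq_zero_or_pos l with hl | hl
    · -- word does not start with c: both sides are immediately False
      subst hl
      simp only [List.replicate_zero, List.nil_append] at hwl
      rw [← hwl] at htwh
      have hA : aLoop (c :: rest) wl 0 0 = false := by
        refine aLoop_false (by simp) ?_ (fun h => by omega) (fun h => by omega)
        rintro ⟨hw, he⟩
        have hwne : wl ≠ [] := List.ne_nil_of_length_pos (by omega)
        rw [getD_head wl hwne] at he
        have : (c :: rest).getD 0 'a' = c := by simp [List.getD]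
        rw [this] at he
        apply htwh
        rw [List.head?_eq_some_head hwne, ← he]
      rw [hA, hgs]
      cases wl with
      | nil =>
        rw [show pvGroups ([] : List Char) = [] from by rw [pvGroups]]
        exact (pvCheck_cons_nil _ _).symm
      | cons d r =>
        have hdc : c ≠ d := by
          intro h; apply htwh; simp [h]
        rw [pvGroups, pvCheck, if_pos hdc]
    · -- word starts with a run of l ≥ 1 copies of c
      have hgw : pvGroups wl = (c, l) :: pvGroups tw := by
        have := pvGroups_rep (l-1) c tw htwh
        rw [show l - 1 + 1 = l from by omega] at this
        rw [hwl, this]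
      have hdrop : wl.drop l = tw := by
        rw [hwl]; exact List.drop_left' (by simp)
      rcases lt_trichotomy l k with hlk | hlk | hlk
      · -- 1 ≤ l < k : match l, then the run must stretch
        have hph1 := aLoop_phase1 k l c tl tw (c :: rest) wl hsl hwl l 0 (by omega)
        simp only [Nat.zero_add] at hph1
        rcases Nat.lt_or_ge k 3 with hk3 | hk3
        · -- k = 2, l = 1 : stretching impossible, both sides False
          have hk2 : k = 2 := by omega
          have hl1 : l = 1 := by omega
          subst hk2 hl1
          have e1 : (c :: rest).getD 1 'a' = c := by rw [hsl]; exact getD_rep_lt 2 c 'a' tl (by omega)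
          have hA : aLoop (c :: rest) wl 1 1 = false := by
            refine aLoop_false (by omega) (phase2_c1 1 c tw (c :: rest) wl hwl htwh e1)
              (fun h => by omega) ?_
            rintro ⟨_, hlt, _, he⟩
            cases tl with
            | nil =>
              rw [hslen] at hlt; simp at hlt
            | cons x tl' =>
              have e2 : (c :: rest).getD 2 'a' = x := by
                rw [hsl, getD_rep_ge 2 c 'a' (x :: tl') (by omega)]
                simp [List.getD]
              rw [e1, e2] at he
              rw [he] at htl; simp at htl
          rw [hph1, hA, hgs, hgw, pvCheck]
          simp
        · -- k ≥ 3 : stretch through the run, shift to the next group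
          have hph2 := aLoop_phase2 k l c tl tw (c :: rest) wl hsl hwl htwh hk3 (k - l) l hl (by omega)
          have hsh := aLoop_shift (List.replicate k c) tl wl l hb (by omega) 0 0
          simp only [List.length_replicate, Nat.add_zero] at hsh
          rw [← hsl, hdrop] at hsh
          rw [hph1, hph2, hsh, aLoop_eq_check tl tw, hgs, hgw, pvCheck]
          have : ¬ (k ≠ l ∧ ¬(3 ≤ k ∧ l ≤ k)) := by omega
          rw [if_neg (by simp), if_neg this]
      · -- l = k : exact match of the runs, shift to the next group
        subst hlk
        have hph1 := aLoop_phase1 l l c tl tw (c :: rest) wl hsl hwl l 0 (by omega)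
        simp only [Nat.zero_add] at hph1
        have hsh := aLoop_shift (List.replicate l c) tl wl l hb (by omega) 0 0
        simp only [List.length_replicate, Nat.add_zero] at hsh
        rw [← hsl, hdrop] at hsh
        rw [hph1, hsh, aLoop_eq_check tl tw, hgs, hgw, pvCheck]
        rw [if_neg (by simp), if_neg (by omega)]
      · -- l > k : word's run is longer than s's, both sides False
        have hph1 := aLoop_phase1 k l c tl tw (c :: rest) wl hsl hwl k 0 (by omega)
        simp only [Nat.zero_add] at hph1
        have hA : aLoop (c :: rest) wl k k = false := by
          cases tl with
          | nil =>
            simp only [List.length_nil] at hslen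
            rw [aLoop_end (by simp at hslen ⊢; omega)]
            simp only [decide_eq_false_iff_not]
            omega
          | cons x tl' =>
            have ek : (c :: rest).getD k 'a' = x := by
              rw [hsl, getD_rep_ge k c 'a' (x :: tl') (le_refl k)]
              simp [List.getD]
            have ekm : (c :: rest).getD (k-1) 'a' = c := by
              rw [hsl]; exact getD_rep_lt k c 'a' (x :: tl') (by omega)
            have hxc : x ≠ c := by simpa using htl
            refine aLoop_false (by simp at hslen ⊢; omega) ?_ ?_ ?_
            · rintro ⟨_, he⟩
              have ew : wl.getD k 'a' = c := by
                rw [hwl]; exact getD_rep_lt l c 'a' tw (by omega)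
              rw [ek, ew] at he; exact hxc he
            · rintro ⟨_, he, _⟩
              rw [ek, ekm] at he; exact hxc he
            · rintro ⟨_, _, he, _⟩
              rw [ek, ekm] at he; exact hxc he.symm
        rw [hph1, hA, hgs, hgw, pvCheck]
        have : (k ≠ l ∧ ¬(3 ≤ k ∧ l ≤ k)) := by omega
        rw [if_neg (by simp), if_pos this]
termination_by sl.length
decreasing_by all_goals exact htlt

-- ===== VERDICT (by name: the statement is the Claim_ definition above) =====
theorem isStretchy_spec : Claim_equal_isStretchy := by
  intro s word _
  show isStretchy s word = isStretchy_alt s word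
  exact aLoop_eq_check s.toList word.toList
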